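-- pv_equiv track=rewrite | github.com/tommyma3/CS285_spring2026 | hw4/scripts/modal_train.py | _is_wandb_enabled_for_train_args
-- ===== SOURCE A (Python) =====
-- def _is_wandb_enabled_for_train_args(args: tuple[str, ...] | list[str]) -> bool:
--     # Mirror hw4.train argparse semantics:
--     # - default is enabled
--     # - --no-wandb_enabled disables
--     # - --wandb_enabled enables
--     enabled = True
--     for token in args:
--         if token == "--no-wandb_enabled":
--             enabled = False
--         elif token == "--wandb_enabled":
--             enabled = True
--     return enabled
-- ===== SOURCE B (Python) =====
-- def _is_wandb_enabled_for_train_args(args):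
--     # Backward early-exit search for the last relevant flag; default True.
--     for token in reversed(args):
--         if token == "--wandb_enabled":
--             return True
--         if token == "--no-wandb_enabled":
--             return False
--     return True
-- ===== Notes on version B (the rewrite author's own statement) =====
-- stated objective: alternative
-- what changed: Replaces the forward full scan that overwrites an accumulator with a backward early-exit search that returns on the first (i.e. last-in-order) relevant flag.
import Mathlib
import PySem

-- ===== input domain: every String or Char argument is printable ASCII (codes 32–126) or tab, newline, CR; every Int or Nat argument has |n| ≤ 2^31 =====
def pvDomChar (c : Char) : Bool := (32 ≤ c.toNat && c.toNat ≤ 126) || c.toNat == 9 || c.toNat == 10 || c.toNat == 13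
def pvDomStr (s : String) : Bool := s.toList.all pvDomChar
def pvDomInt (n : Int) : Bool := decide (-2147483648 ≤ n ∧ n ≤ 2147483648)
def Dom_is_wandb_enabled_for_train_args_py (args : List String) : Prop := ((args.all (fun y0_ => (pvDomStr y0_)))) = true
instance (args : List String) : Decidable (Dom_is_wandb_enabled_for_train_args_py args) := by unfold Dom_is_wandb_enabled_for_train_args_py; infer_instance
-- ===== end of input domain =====

-- B differs from A by a backward early-exit search for the last relevant flag (alternative decomposition, same cost).

-- ===== PORT A =====
-- forward scan, accumulator 'enabled' starts True
def is_wandb_enabled_for_train_args_py (args : List String) : Bool :=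
  args.foldl
    (fun enabled token =>
      if token = "--no-wandb_enabled" then false
      else if token = "--wandb_enabled" then true
      else enabled)
    true

-- ===== PORT B =====
-- scan over reversed(args), return at the first relevant flag
def pvAltLoop : List String → Bool
  | [] => true
  | token :: rest =>
      if token = "--wandb_enabled" then true
      else if token = "--no-wandb_enabled" then false
      else pvAltLoop rest

def is_wandb_enabled_for_train_args_py_alt (args : List String) : Bool :=
  pvAltLoop args.reverse

-- ===== PRECONDITION & SPEC =====
def Spec_is_wandb_enabled_for_train_args_py (args : List String) (out : Bool) : Prop := out = is_wandb_enabled_for_train_args_py_alt args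
instance (args : List String) (out : Bool) : Decidable (Spec_is_wandb_enabled_for_train_args_py args out) := by unfold Spec_is_wandb_enabled_for_train_args_py; infer_instance

-- ===== CLAIM (what is proved, stated in full; the proofs are below) =====
def Claim_equal_is_wandb_enabled_for_train_args_py : Prop := ∀ (args : List String), Dom_is_wandb_enabled_for_train_args_py args → Spec_is_wandb_enabled_for_train_args_py args (is_wandb_enabled_for_train_args_py args)

-- ===== LEMMAS AND PROOFS =====

-- pvAltLoop generalized over the default value reached when no flag is present
def pvAltLoopD : List String → Bool → Bool
  | [], acc => acc
  | token :: rest, acc =>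
      if token = "--wandb_enabled" then true
      else if token = "--no-wandb_enabled" then false
      else pvAltLoopD rest acc

theorem pvAltLoop_eq_D (xs : List String) : pvAltLoop xs = pvAltLoopD xs true := by
  induction xs with
  | nil => rfl
  | cons t rest ih => simp [pvAltLoop, pvAltLoopD, ih]

theorem pvAltLoopD_append (ys : List String) (t : String) (acc : Bool) :
    pvAltLoopD (ys ++ [t]) acc =
      pvAltLoopD ys (if t = "--no-wandb_enabled" then false
                     else if t = "--wandb_enabled" then true else acc) := by
  induction ys with
  | nil =>
      by_cases h1 : t = "--wandb_enabled"
      · subst h1; simp [pvAltLoopD]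
      · by_cases h2 : t = "--no-wandb_enabled" <;> simp [pvAltLoopD, h1, h2]
  | cons y rest ih => simp [pvAltLoopD, ih]

theorem foldl_eq_altD (xs : List String) (acc : Bool) :
    xs.foldl
      (fun enabled token =>
        if token = "--no-wandb_enabled" then false
        else if token = "--wandb_enabled" then true
        else enabled) acc = pvAltLoopD xs.reverse acc := by
  induction xs generalizing acc with
  | nil => rfl
  | cons t rest ih =>
      rw [List.foldl_cons, ih, List.reverse_cons, pvAltLoopD_append]

-- ===== VERDICT (by name: the statement is the Claim_ definition above) =====
theorem is_wandb_enabled_for_train_args_py_spec : Claim_equal_is_wandb_enabled_for_train_args_py := by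
  intro args _
  unfold Spec_is_wandb_enabled_for_train_args_py is_wandb_enabled_for_train_args_py is_wandb_enabled_for_train_args_py_alt
  rw [foldl_eq_altD, pvAltLoop_eq_D]
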